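-- pv_equiv track=rewrite | github.com/ritayyshh/WinSecMon | modules/firewall_check.py | parse_profile_output
-- ===== SOURCE A (Python) =====
-- from typing import Dict, Any
--
-- def parse_profile_output(output: str) -> Dict[str, Dict[str, str]]:
--     """Parse the netsh advfirewall show allprofiles output"""
--     profiles = {}
--     current_profile = None
--
--     for line in output.split('\n'):
--         line = line.strip()
--         if not line:
--             continue
--
--         if line.startswith('Domain Profile'):
--             current_profile = 'domain'
--             profiles[current_profile] = {}
--         elif line.startswith('Private Profile'):
--             current_profile = 'private'
--             profiles[current_profile] = {}
--         elif line.startswith('Public Profile'):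
--             current_profile = 'public'
--             profiles[current_profile] = {}
--         elif current_profile and ':' in line:
--             key, value = [part.strip() for part in line.split(':', 1)]
--             profiles[current_profile][key] = value
--
--     return profiles
-- ===== SOURCE B (Python) =====
-- def parse_profile_output(output: str):
--     """Parse the netsh advfirewall show allprofiles output (two-phase: segment into blocks, then parse each block)"""
--     HEADERS = (('Domain Profile', 'domain'), ('Private Profile', 'private'), ('Public Profile', 'public'))
--     # phase 1: group stripped non-empty lines into labelled blocks
--     blocks = []
--     for raw in output.split('\n'):
--         line = raw.strip()
--         if not line:
--             continue
--         label = next((lab for prefix, lab in HEADERS if line.startswith(prefix)), None)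
--         if label is not None:
--             blocks.append((label, []))
--         elif blocks:
--             blocks[-1][1].append(line)
--     # phase 2: parse each block's body into a dict; assemble in block order (overwrite keeps position)
--     result = {}
--     for label, body in blocks:
--         settings = {}
--         for line in body:
--             if ':' in line:
--                 key, value = line.split(':', 1)
--                 settings[key.strip()] = value.strip()
--         result[label] = settings
--     return result
-- ===== Notes on version B (the rewrite author's own statement) =====
-- stated objective: alternative
-- what changed: Replaces A's single stateful loop that writes into a nested dict via a current-profile variable with a two-phase decomposition: first segment the stripped non-empty lines into labelled profile blocks, then parse each block's body lines into a dict and assemble the result in block order.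
import Mathlib
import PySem

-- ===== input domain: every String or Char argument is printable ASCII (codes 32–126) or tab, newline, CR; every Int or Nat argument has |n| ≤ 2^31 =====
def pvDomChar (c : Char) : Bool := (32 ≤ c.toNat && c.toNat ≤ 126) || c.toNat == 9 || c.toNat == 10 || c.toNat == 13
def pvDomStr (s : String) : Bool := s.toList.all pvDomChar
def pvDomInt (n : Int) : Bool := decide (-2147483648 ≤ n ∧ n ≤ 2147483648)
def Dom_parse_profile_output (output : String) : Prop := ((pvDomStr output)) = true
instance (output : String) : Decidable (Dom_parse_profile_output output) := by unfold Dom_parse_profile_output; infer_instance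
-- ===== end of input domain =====

-- B replaces A's single stateful loop by a two-phase decomposition (segment lines into
-- labelled blocks, then parse each block); objective: alternative structure, same cost.

-- ===== PORT A =====
-- One iteration of A's loop; state = (profiles dict, current_profile).
-- `Dict.modify` with default `Dict.empty` is exact here: A reaches that branch only when
-- `current_profile` is a key of `profiles` (every header sets both at once).
def pvStepA (st : PySem.Dict String (PySem.Dict String String) × Option String) (raw : String) :
    PySem.Dict String (PySem.Dict String String) × Option String :=
  let line := PySem.Str.strip raw
  if line = "" then st
  else if PySem.Str.startswith line "Domain Profile" then
    (st.1.insert "domain" PySem.Dict.empty, some "domain")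
  else if PySem.Str.startswith line "Private Profile" then
    (st.1.insert "private" PySem.Dict.empty, some "private")
  else if PySem.Str.startswith line "Public Profile" then
    (st.1.insert "public" PySem.Dict.empty, some "public")
  else
    match st.2 with
    | none => st
    | some cur =>
      if PySem.Str.isIn ":" line then
        -- key, value = [part.strip() for part in line.split(':', 1)]  (always exactly two parts here)
        let parts := ((PySem.Str.splitMax? line ":" 1).getD []).map PySem.Str.strip
        (st.1.modify cur PySem.Dict.empty (fun d => d.insert (parts.getD 0 "") (parts.getD 1 "")),
         some cur)
      else st

def parse_profile_output (output : String) : List (String × List (String × String)) :=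
  let st := ((PySem.Str.split? output "\n").getD []).foldl pvStepA (PySem.Dict.empty, none)
  st.1.items.map (fun p => (p.1, p.2.items))

-- ===== PORT B =====
-- label of a header line, if any (the `next(...)` over HEADERS in Source B)
def pvHeaderLabel (line : String) : Option String :=
  if PySem.Str.startswith line "Domain Profile" then some "domain"
  else if PySem.Str.startswith line "Private Profile" then some "private"
  else if PySem.Str.startswith line "Public Profile" then some "public"
  else none

-- blocks[-1][1].append(line) guarded by `elif blocks:`  (no-op on the empty list)
def pvAppendLast (blocks : List (String × List String)) (line : String) : List (String × List String) :=
  match blocks with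
  | [] => []
  | [b] => [(b.1, b.2 ++ [line])]
  | b :: rest => b :: pvAppendLast rest line

-- phase 1: one line of the segmentation loop
def pvStepB (blocks : List (String × List String)) (raw : String) : List (String × List String) :=
  let line := PySem.Str.strip raw
  if line = "" then blocks
  else
    match pvHeaderLabel line with
    | some lab => blocks ++ [(lab, [])]
    | none => pvAppendLast blocks line

-- phase 2: parse one body line into the block's dict
def pvParseLine (d : PySem.Dict String String) (line : String) : PySem.Dict String String :=
  if PySem.Str.isIn ":" line then
    let parts := (PySem.Str.splitMax? line ":" 1).getD []
    d.insert (PySem.Str.strip (parts.getD 0 "")) (PySem.Str.strip (parts.getD 1 ""))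
  else d

def pvParseBlock (body : List String) : PySem.Dict String String :=
  body.foldl pvParseLine PySem.Dict.empty

-- assemble the result dict in block order (insert overwrites keeping position)
def pvAssemble (blocks : List (String × List String)) : PySem.Dict String (PySem.Dict String String) :=
  blocks.foldl (fun r b => r.insert b.1 (pvParseBlock b.2)) PySem.Dict.empty

def parse_profile_output_alt (output : String) : List (String × List (String × String)) :=
  let blocks := ((PySem.Str.split? output "\n").getD []).foldl pvStepB []
  (pvAssemble blocks).items.map (fun p => (p.1, p.2.items))

-- ===== PRECONDITION & SPEC =====
def Spec_parse_profile_output (output : String) (out : List (String × List (String × String))) : Prop := out = parse_profile_output_alt output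
instance (output : String) (out : List (String × List (String × String))) : Decidable (Spec_parse_profile_output output out) := by unfold Spec_parse_profile_output; infer_instance

-- ===== CLAIM (what is proved, stated in full; the proofs are below) =====
def Claim_equal_parse_profile_output : Prop := ∀ (output : String), Dom_parse_profile_output output → Spec_parse_profile_output output (parse_profile_output output)

-- ===== LEMMAS AND PROOFS =====

-- label of the last block = A's current_profile
def pvLast (blocks : List (String × List String)) : Option String :=
  blocks.getLast?.map (·.1)

theorem pvAssemble_concat (bs : List (String × List String)) (b : String × List String) :
    pvAssemble (bs ++ [b]) = (pvAssemble bs).insert b.1 (pvParseBlock b.2) := by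
  simp [pvAssemble, List.foldl_append]

theorem pvParseBlock_concat (body : List String) (line : String) :
    pvParseBlock (body ++ [line]) = pvParseLine (pvParseBlock body) line := by
  simp [pvParseBlock, List.foldl_append]

theorem pvAppendLast_concat (init : List (String × List String)) (lab : String)
    (body : List String) (line : String) :
    pvAppendLast (init ++ [(lab, body)]) line = init ++ [(lab, body ++ [line])] := by
  induction init with
  | nil => rfl
  | cons b rest ih => cases rest <;> simp_all [pvAppendLast]

theorem pvModify_insert_self (d : PySem.Dict String (PySem.Dict String String)) (k : String)
    (v d0 : PySem.Dict String String) (f : PySem.Dict String String → PySem.Dict String String) :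
    (d.insert k v).modify k d0 f = d.insert k (f v) := by
  simp [PySem.Dict.modify, PySem.Dict.getD_insert_self, PySem.Dict.insert_insert_self]

-- one step of A, started from the state B's blocks describe, is one step of B
theorem pvStep_eq (blocks : List (String × List String)) (raw : String) :
    pvStepA (pvAssemble blocks, pvLast blocks) raw
      = (pvAssemble (pvStepB blocks raw), pvLast (pvStepB blocks raw)) := by
  simp only [pvStepA, pvStepB, pvHeaderLabel]
  generalize PySem.Str.strip raw = line
  by_cases h0 : line = ""
  · simp [h0]
  rw [if_neg h0, if_neg h0]
  by_cases h1 : PySem.Str.startswith line "Domain Profile" = true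
  · simp only [h1, reduceIte, pvAssemble_concat, pvLast, List.getLast?_concat,
      Option.map_some]
    rfl
  rw [if_neg h1, if_neg h1]
  by_cases h2 : PySem.Str.startswith line "Private Profile" = true
  · simp only [h2, reduceIte, pvAssemble_concat, pvLast, List.getLast?_concat,
      Option.map_some]
    rfl
  rw [if_neg h2, if_neg h2]
  by_cases h3 : PySem.Str.startswith line "Public Profile" = true
  · simp only [h3, reduceIte, pvAssemble_concat, pvLast, List.getLast?_concat,
      Option.map_some]
    rfl
  rw [if_neg h3, if_neg h3]
  -- body line: case on blocks empty / init ++ [last]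
  rcases List.eq_nil_or_concat blocks with hb | ⟨init, ⟨lab, body⟩, hb⟩ <;> subst hb
  · simp [pvLast, pvAppendLast]
  · simp only [List.concat_eq_append, pvAppendLast_concat, pvLast, List.getLast?_concat,
      Option.map_some]
    by_cases hc : PySem.Str.isIn ":" line = true
    · rw [if_pos hc, pvAssemble_concat, pvAssemble_concat, pvModify_insert_self,
        pvParseBlock_concat]
      simp only [pvParseLine, hc, if_true]
      have hk := List.getD_map ((PySem.Str.splitMax? line ":" 1).getD [])
        "" PySem.Str.strip (n := 0)
      have hv := List.getD_map ((PySem.Str.splitMax? line ":" 1).getD [])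
        "" PySem.Str.strip (n := 1)
      rw [show PySem.Str.strip "" = "" from rfl] at hk hv
      rw [hk, hv]
    · rw [if_neg hc, pvAssemble_concat, pvAssemble_concat, pvParseBlock_concat]
      simp only [pvParseLine, hc, Bool.false_eq_true, if_false]

theorem pvFold_eq (lines : List String) (blocks : List (String × List String)) :
    lines.foldl pvStepA (pvAssemble blocks, pvLast blocks)
      = (pvAssemble (lines.foldl pvStepB blocks), pvLast (lines.foldl pvStepB blocks)) := by
  induction lines generalizing blocks with
  | nil => rfl
  | cons l ls ih => rw [List.foldl_cons, List.foldl_cons, pvStep_eq, ih]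

-- ===== VERDICT (by name: the statement is the Claim_ definition above) =====
theorem parse_profile_output_spec : Claim_equal_parse_profile_output := by
  intro output _
  unfold Spec_parse_profile_output parse_profile_output parse_profile_output_alt
  have h := pvFold_eq ((PySem.Str.split? output "\n").getD []) []
  have h0 : pvAssemble [] = PySem.Dict.empty := rfl
  have h1 : pvLast ([] : List (String × List String)) = none := rfl
  rw [h0, h1] at h
  rw [h]
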